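-- pv_equiv track=rewrite | github.com/ngnguyen512/html.porfolio | public/guess_proverb.py | get_raw_lower_words
-- ===== SOURCE A (Python) =====
-- def get_raw_lower_words(proverbs, masked):
--     ret = ""
--     for c, is_masked in zip(proverbs, masked):
--         if is_masked or c == "'":
--             ret += c.lower()
--         else:
--             ret += '|'
--     return [word for word in ret.split("|") if len(word.strip()) > 0]
-- ===== SOURCE B (Python) =====
-- def get_raw_lower_words(proverbs, masked):
--     words = []
--     current = ""
--     for c, is_masked in zip(proverbs, masked):
--         ch = c.lower() if (is_masked or c == "'") else '|'
--         if ch == '|':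
--             if len(current.strip()) > 0:
--                 words.append(current)
--             current = ""
--         else:
--             current += ch
--     if len(current.strip()) > 0:
--         words.append(current)
--     return words
-- ===== Notes on version B (the rewrite author's own statement) =====
-- stated objective: alternative
-- what changed: Single pass that accumulates the current word and flushes it at each boundary, instead of building a '|'-delimited string and re-scanning it with split('|') plus a filtering comprehension.
import Mathlib
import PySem

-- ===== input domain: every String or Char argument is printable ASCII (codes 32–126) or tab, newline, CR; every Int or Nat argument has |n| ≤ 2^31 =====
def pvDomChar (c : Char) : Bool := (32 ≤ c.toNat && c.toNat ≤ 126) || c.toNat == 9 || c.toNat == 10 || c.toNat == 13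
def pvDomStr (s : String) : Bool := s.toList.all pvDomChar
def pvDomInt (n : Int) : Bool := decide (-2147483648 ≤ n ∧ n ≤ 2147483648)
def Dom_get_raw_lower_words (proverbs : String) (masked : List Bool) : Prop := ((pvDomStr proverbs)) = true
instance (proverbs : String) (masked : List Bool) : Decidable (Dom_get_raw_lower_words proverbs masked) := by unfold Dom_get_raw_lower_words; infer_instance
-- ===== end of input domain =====

-- B replaces A's build-a-'|'-delimited-string-then-split('|')-and-filter pipeline with a
-- single pass that accumulates the current word and flushes it at each boundary (objective: alternative).

-- ===== PORT A =====
def get_raw_lower_words (proverbs : String) (masked : List Bool) : List String :=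
  let ret : List Char :=
    (proverbs.toList.zip masked).foldl
      (fun ret p =>
        if p.2 || (p.1 == '\'') then ret ++ PySem.Chars.lower [p.1]
        else ret ++ ['|'])
      []
  ((PySem.Chars.splitOn ret ['|']).filter
      (fun w => decide (0 < (PySem.Chars.strip w).length))).map String.ofList

-- ===== PORT B =====
def get_raw_lower_words_alt (proverbs : String) (masked : List Bool) : List String :=
  let st : List String × List Char :=
    (proverbs.toList.zip masked).foldl
      (fun st p =>
        let ch := if p.2 || (p.1 == '\'') then PySem.Chars.lowerChar p.1 else '|'
        if ch == '|' then
          (if 0 < (PySem.Chars.strip st.2).length then st.1 ++ [String.ofList st.2] else st.1, [])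
        else
          (st.1, st.2 ++ [ch]))
      ([], [])
  if 0 < (PySem.Chars.strip st.2).length then st.1 ++ [String.ofList st.2] else st.1

-- ===== PRECONDITION & SPEC =====
def Spec_get_raw_lower_words (proverbs : String) (masked : List Bool) (out : List String) : Prop := out = get_raw_lower_words_alt proverbs masked
instance (proverbs : String) (masked : List Bool) (out : List String) : Decidable (Spec_get_raw_lower_words proverbs masked out) := by unfold Spec_get_raw_lower_words; infer_instance

-- ===== CLAIM (what is proved, stated in full; the proofs are below) =====
def Claim_equal_get_raw_lower_words : Prop := ∀ (proverbs : String) (masked : List Bool), Dom_get_raw_lower_words proverbs masked → Spec_get_raw_lower_words proverbs masked (get_raw_lower_words proverbs masked)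

-- ===== LEMMAS AND PROOFS =====

-- the transformed character for one (char, mask) pair
def pvTrans (p : Char × Bool) : Char :=
  if p.2 || (p.1 == '\'') then PySem.Chars.lowerChar p.1 else '|'

-- simple structural split on '|': (first piece, remaining pieces)
def pvSplit : List Char → List Char × List (List Char)
  | [] => ([], [])
  | c :: r =>
    let s := pvSplit r
    if c = '|' then ([], s.1 :: s.2) else (c :: s.1, s.2)

def pvNB (w : List Char) : Bool := decide (0 < (PySem.Chars.strip w).length)

-- B's loop body, named (definitionally equal to the lambda in the port)
def pvStep (st : List String × List Char) (p : Char × Bool) : List String × List Char :=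
  let ch := if p.2 || (p.1 == '\'') then PySem.Chars.lowerChar p.1 else '|'
  if ch == '|' then
    (if 0 < (PySem.Chars.strip st.2).length then st.1 ++ [String.ofList st.2] else st.1, [])
  else
    (st.1, st.2 ++ [ch])

theorem pvStep_bar (st : List String × List Char) (p : Char × Bool) (h : pvTrans p = '|') :
    pvStep st p = (if 0 < (PySem.Chars.strip st.2).length then st.1 ++ [String.ofList st.2] else st.1, []) := by
  unfold pvTrans at h
  by_cases hc : (p.2 || (p.1 == '\'')) = true
  · rw [if_pos hc] at h
    simp [pvStep, hc, h]
  · rw [if_neg hc] at h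
    simp [pvStep, hc]

theorem pvStep_chr (st : List String × List Char) (p : Char × Bool) (h : pvTrans p ≠ '|') :
    pvStep st p = (st.1, st.2 ++ [pvTrans p]) := by
  unfold pvTrans at h ⊢
  by_cases hc : (p.2 || (p.1 == '\'')) = true
  · rw [if_pos hc] at h
    simp [pvStep, hc, h]
  · rw [if_neg hc] at h
    exact absurd rfl h

-- A's ret-building loop produces exactly the transformed characters
theorem pvA_ret (l : List (Char × Bool)) (acc : List Char) :
    l.foldl (fun ret p => if p.2 || (p.1 == '\'') then ret ++ PySem.Chars.lower [p.1]
                          else ret ++ ['|']) acc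
      = acc ++ l.map pvTrans := by
  induction l generalizing acc with
  | nil => simp
  | cons p l ih =>
      simp only [List.foldl_cons, List.map_cons, pvTrans]
      by_cases h : (p.2 || (p.1 == '\'')) = true
      · rw [if_pos h, if_pos h, ih]; simp [PySem.Chars.lower]
      · rw [if_neg h, if_neg h, ih]; simp

-- PySem's fuel-based splitOn on separator "|" computes pvSplit
theorem pvSplitOn_go (l : List Char) (fuel : Nat) (cur : List Char)
    (acc : List (List Char)) (hf : l.length + 1 ≤ fuel) :
    PySem.Chars.splitOn.go ['|'] fuel l cur acc
      = acc.reverse ++ (cur.reverse ++ (pvSplit l).1) :: (pvSplit l).2 := by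
  induction l generalizing fuel cur acc with
  | nil =>
      cases fuel with
      | zero => simp [PySem.Chars.splitOn.go, pvSplit]
      | succ f => simp [PySem.Chars.splitOn.go, pvSplit]
  | cons c r ih =>
      cases fuel with
      | zero => omega
      | succ f =>
          by_cases hc : c = '|'
          · subst hc
            have hpre : List.isPrefixOf ['|'] ('|' :: r) = true := by
              simp [List.isPrefixOf]
            rw [PySem.Chars.splitOn.go]
            simp only [hpre, if_pos, List.length_cons, List.length_nil, List.drop_succ_cons,
              List.drop_zero]
            rw [ih f [] (cur.reverse :: acc) (by simpa using Nat.le_of_succ_le_succ hf)]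
            simp [pvSplit]
          · have hpre : List.isPrefixOf ['|'] (c :: r) = false := by
              simp [List.isPrefixOf]
              exact fun h => hc h.symm
            rw [PySem.Chars.splitOn.go]
            simp only [hpre, Bool.false_eq_true, if_false]
            rw [ih f (c :: cur) acc (by simpa using Nat.le_of_succ_le_succ hf)]
            simp [pvSplit, hc]

theorem pvSplitOn_eq (l : List Char) :
    PySem.Chars.splitOn l ['|'] = (pvSplit l).1 :: (pvSplit l).2 := by
  have h := pvSplitOn_go l (l.length + 1) [] [] (le_refl _)
  simpa [PySem.Chars.splitOn] using h

-- B's loop, characterized via pvSplit on the transformed characters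
theorem pvB_loop (l : List (Char × Bool)) (words : List String) (cur : List Char) :
    (let st := l.foldl pvStep (words, cur)
     if 0 < (PySem.Chars.strip st.2).length then st.1 ++ [String.ofList st.2] else st.1)
      = words ++
        (((cur ++ (pvSplit (l.map pvTrans)).1) :: (pvSplit (l.map pvTrans)).2).filter pvNB).map
          String.ofList := by
  induction l generalizing words cur with
  | nil =>
      simp only [List.foldl_nil, List.map_nil, pvSplit]
      by_cases h : 0 < (PySem.Chars.strip cur).length <;> simp [List.filter, pvNB, h]
  | cons p l ih =>
      simp only [List.foldl_cons, List.map_cons]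
      by_cases hb : pvTrans p = '|'
      · rw [pvStep_bar _ _ hb, ih]
        have hsp : pvSplit (pvTrans p :: l.map pvTrans)
            = ([], (pvSplit (l.map pvTrans)).1 :: (pvSplit (l.map pvTrans)).2) := by
          simp [pvSplit, hb]
        rw [hsp]
        simp only [List.nil_append, List.filter_cons]
        by_cases h : 0 < (PySem.Chars.strip cur).length <;>
          simp [pvNB, h, List.append_assoc]
      · rw [pvStep_chr _ _ hb, ih]
        have hsp : pvSplit (pvTrans p :: l.map pvTrans)
            = (pvTrans p :: (pvSplit (l.map pvTrans)).1, (pvSplit (l.map pvTrans)).2) := by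
          simp [pvSplit, hb]
        rw [hsp]
        simp [pvTrans]

-- ===== VERDICT (by name: the statement is the Claim_ definition above) =====
theorem get_raw_lower_words_spec : Claim_equal_get_raw_lower_words := by
  unfold Claim_equal_get_raw_lower_words
  intro proverbs masked _
  unfold Spec_get_raw_lower_words get_raw_lower_words get_raw_lower_words_alt
  rw [pvA_ret]
  rw [show (fun (st : List String × List Char) (p : Char × Bool) =>
        let ch := if p.2 || (p.1 == '\'') then PySem.Chars.lowerChar p.1 else '|'
        if ch == '|' then
          (if 0 < (PySem.Chars.strip st.2).length then st.1 ++ [String.ofList st.2] else st.1, [])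
        else (st.1, st.2 ++ [ch])) = pvStep from rfl]
  rw [pvB_loop]
  simp only [List.nil_append, pvSplitOn_eq]
  rfl
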